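-- pv_equiv track=rewrite | github.com/2024-2-analitica-descriptiva/2024-2-LAB-01-programacion-basica-en-python-dafemu20 | homework/pregunta_05.py | obtenerValorMayorYMenor
-- ===== SOURCE A (Python) =====
-- def obtenerValorMayorYMenor(sequence):
--     """
--     Retorna el valor mayor y menor de una secuencia de numeros.
--
--     Parameters:
--     sequence: list
--         Lista de numeros.
--
--     Returns:
--     tuple
--         Tupla con el valor mayor y menor de la secuencia.
--     """
--     groupedData = {}
--     for letter, number in sequence:
--         if letter not in groupedData:
--             groupedData[letter] = []
--         groupedData[letter].append(number)
--
--     tuplasMinimosMaximos = []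
--     for letter in groupedData.keys():
--         (maximo, minimo) = (max(groupedData[letter]), min(groupedData[letter]))
--         tuplasMinimosMaximos.append((letter, int(maximo), int(minimo)))
--
--     return tuplasMinimosMaximos
-- ===== SOURCE B (Python) =====
-- def obtenerValorMayorYMenor(sequence):
--     aggregates = {}
--     for letter, number in sequence:
--         if letter in aggregates:
--             mx, mn = aggregates[letter]
--             aggregates[letter] = (max(mx, number), min(mn, number))
--         else:
--             aggregates[letter] = (number, number)
--     return [(letter, int(mx), int(mn)) for letter, (mx, mn) in aggregates.items()]
-- ===== Notes on version B (the rewrite author's own statement) =====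
-- stated objective: simpler
-- what changed: Instead of collecting every number into a per-letter list and doing a second max/min pass over each list, B keeps only a running (max, min) pair per letter in one pass and emits the dict items directly.
import Mathlib
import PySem

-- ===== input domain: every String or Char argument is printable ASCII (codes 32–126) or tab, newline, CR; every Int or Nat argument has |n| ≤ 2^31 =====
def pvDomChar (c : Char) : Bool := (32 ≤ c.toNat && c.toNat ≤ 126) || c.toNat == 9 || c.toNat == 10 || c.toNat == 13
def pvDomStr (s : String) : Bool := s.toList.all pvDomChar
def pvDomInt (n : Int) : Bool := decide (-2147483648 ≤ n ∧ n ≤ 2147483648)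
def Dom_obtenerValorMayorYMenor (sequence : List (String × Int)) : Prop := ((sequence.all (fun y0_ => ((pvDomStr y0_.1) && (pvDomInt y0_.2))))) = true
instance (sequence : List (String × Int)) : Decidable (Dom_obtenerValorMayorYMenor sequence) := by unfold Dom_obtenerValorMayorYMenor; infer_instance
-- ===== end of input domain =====

-- B replaces A's per-letter number lists and second max/min pass by one pass keeping a running (max, min) per letter; objective: simpler.


-- ===== PORT A =====
def obtenerValorMayorYMenor (sequence : List (String × Int)) : List (String × Int × Int) :=
  let groupedData : PySem.Dict String (List Int) :=
    sequence.foldl (fun d p =>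
      let d' := if d.contains p.1 then d else d.insert p.1 []
      d'.modify p.1 [] (fun l => l ++ [p.2])) PySem.Dict.empty
  groupedData.keys.foldl (fun acc letter =>
    let nums := groupedData.getD letter []
    -- every group is nonempty, so Python's max/min never raise; the `.getD 0` default is unreachable
    let maximo := (PySem.List.max? nums (fun y => y)).getD 0
    let minimo := (PySem.List.min? nums (fun y => y)).getD 0
    acc ++ [(letter, maximo, minimo)]) []

-- ===== PORT B =====
def obtenerValorMayorYMenor_alt (sequence : List (String × Int)) : List (String × Int × Int) :=
  let aggregates : PySem.Dict String (Int × Int) :=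
    sequence.foldl (fun d p =>
      d.insert p.1 (match d.get? p.1 with
        | some mm => (max mm.1 p.2, min mm.2 p.2)
        | none => (p.2, p.2))) PySem.Dict.empty
  aggregates.items.map (fun q => (q.1, q.2.1, q.2.2))

-- ===== PRECONDITION & SPEC =====
def Spec_obtenerValorMayorYMenor (sequence : List (String × Int)) (out : List (String × Int × Int)) : Prop := out = obtenerValorMayorYMenor_alt sequence
instance (sequence : List (String × Int)) (out : List (String × Int × Int)) : Decidable (Spec_obtenerValorMayorYMenor sequence out) := by unfold Spec_obtenerValorMayorYMenor; infer_instance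

-- ===== CLAIM (what is proved, stated in full; the proofs are below) =====
def Claim_equal_obtenerValorMayorYMenor : Prop := ∀ (sequence : List (String × Int)), Dom_obtenerValorMayorYMenor sequence → Spec_obtenerValorMayorYMenor sequence (obtenerValorMayorYMenor sequence)

-- ===== LEMMAS AND PROOFS =====

-- B's running (max, min) update, as a function on the optional per-letter accumulator
def pvCombine (o : Option (Int × Int)) (n : Int) : Option (Int × Int) :=
  match o with
  | some mm => some (max mm.1 n, min mm.2 n)
  | none => some (n, n)

-- inserting at a fresh key and then overwriting it is one insert
theorem pv_insert_insert_fresh (d : PySem.Dict String (List Int)) (k : String)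
    (v w : List Int) (h : d.contains k = false) :
    (d.insert k v).insert k w = d.insert k w := by
  have hk : ∀ p ∈ d.items, (p.1 == k) = false := by
    intro p hp
    have h1 : p.1 ∈ d.keys := PySem.Dict.mem_keys_of_mem_items d hp
    have h2 : k ∉ d.keys := by
      intro hm
      rw [(PySem.Dict.contains_iff_mem_keys d k).mpr hm] at h
      exact absurd h (by simp)
    simp only [beq_eq_false_iff_ne, ne_eq]
    rintro rfl; exact h2 h1
  apply PySem.Dict.ext
  rw [PySem.Dict.items_insert_of_contains _ w (PySem.Dict.contains_insert_self d k v),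
      PySem.Dict.items_insert_of_not_contains _ v h,
      PySem.Dict.items_insert_of_not_contains _ w h, List.map_append]
  simp only [List.map_cons, List.map_nil, beq_self_eq_true, if_true]
  congr 1
  nth_rewrite 2 [show d.items = d.items.map id from (List.map_id _).symm]
  apply List.map_congr_left
  intro p hp
  simp [hk p hp]

-- A's grouping step (insert-an-empty-list-if-missing, then append) equals the bare modify step
theorem pv_stepA_eq (d : PySem.Dict String (List Int)) (p : String × Int) :
    (let d' := if d.contains p.1 then d else d.insert p.1 []
     d'.modify p.1 [] (fun l => l ++ [p.2])) = d.modify p.1 [] (fun l => l ++ [p.2]) := by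
  by_cases hc : d.contains p.1
  · simp [hc]
  · simp only [Bool.not_eq_true] at hc
    simp only [hc, Bool.false_eq_true, if_false, PySem.Dict.modify,
      PySem.Dict.getD_insert_self, PySem.Dict.getD_of_not_contains d [] hc, List.nil_append]
    exact pv_insert_insert_fresh d p.1 [] [p.2] hc

-- B's fold, looked up at one key, is pvCombine folded over that key's numbers
theorem pv_foldB_get? (l : List (String × Int)) (d : PySem.Dict String (Int × Int)) (k : String) :
    (l.foldl (fun d p =>
      d.insert p.1 (match d.get? p.1 with
        | some mm => (max mm.1 p.2, min mm.2 p.2)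
        | none => (p.2, p.2))) d).get? k
    = ((l.filter (fun p => p.1 == k)).map (fun p => p.2)).foldl pvCombine (d.get? k) := by
  induction l generalizing d with
  | nil => rfl
  | cons p l ih =>
    rw [List.foldl_cons, ih]
    by_cases hk : p.1 = k
    · have hfc : (p :: l).filter (fun p => p.1 == k) = p :: l.filter (fun p => p.1 == k) := by
        simp [hk]
      rw [hfc, List.map_cons, List.foldl_cons]
      congr 1
      rw [PySem.Dict.get?_insert, if_pos hk.symm, ← hk]
      cases hget : d.get? p.1 <;> simp [pvCombine]
    · have hfc : (p :: l).filter (fun p => p.1 == k) = l.filter (fun p => p.1 == k) := by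
        simp [hk]
      rw [hfc]
      congr 1
      rw [PySem.Dict.get?_insert, if_neg (fun h => hk h.symm)]

-- folding pvCombine from a pair is the two running extrema
theorem pv_foldCombine_some (t : List Int) (m n : Int) :
    t.foldl pvCombine (some (m, n)) = some (t.foldl max m, t.foldl min n) := by
  induction t generalizing m n with
  | nil => rfl
  | cons a t ih => simp only [List.foldl_cons, pvCombine]; exact ih _ _

-- the items of a dict with Nodup keys, mapped, are its keys mapped through get?
theorem pv_items_map (d : PySem.Dict String (Int × Int)) (h : d.keys.Nodup) :
    d.items.map (fun q => (q.1, q.2.1, q.2.2))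
    = d.keys.map (fun k => (k, ((d.get? k).getD (0, 0)).1, ((d.get? k).getD (0, 0)).2)) := by
  simp only [PySem.Dict.keys, List.map_map]
  apply List.map_congr_left
  intro q hq
  have := PySem.Dict.get?_of_mem_items d (k := q.1) (v := q.2) (by simpa using hq) h
  simp [this]

theorem pv_main (sequence : List (String × Int)) :
    obtenerValorMayorYMenor sequence = obtenerValorMayorYMenor_alt sequence := by
  have hA : (sequence.foldl (fun d p =>
      let d' := if d.contains p.1 then d else d.insert p.1 []
      d'.modify p.1 [] (fun l => l ++ [p.2])) PySem.Dict.empty)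
      = sequence.foldl (fun d p => d.modify p.1 [] (fun l => l ++ [p.2])) PySem.Dict.empty :=
    PySem.List.foldl_congr_mem sequence _ _ _ (fun d p _ => pv_stepA_eq d p)
  unfold obtenerValorMayorYMenor obtenerValorMayorYMenor_alt
  rw [hA]
  set G := sequence.foldl (fun d p => d.modify p.1 [] (fun l => l ++ [p.2])) PySem.Dict.empty with hGdef
  set Agg := sequence.foldl (fun (d : PySem.Dict String (Int × Int)) p =>
      d.insert p.1 (match d.get? p.1 with
        | some mm => (max mm.1 p.2, min mm.2 p.2)
        | none => (p.2, p.2))) PySem.Dict.empty with hAggdef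
  have hKG : G.keys = PySem.Set.ofList (sequence.map (fun p => p.1)) := by
    rw [hGdef, PySem.Dict.keys_foldl_modify_key sequence (fun p => p.1) []
      (fun _ p => fun l => l ++ [p.2]), PySem.Dict.keys_empty, PySem.Set.update_nil_left]
  have hKAgg : Agg.keys = PySem.Set.ofList (sequence.map (fun p => p.1)) := by
    rw [hAggdef, PySem.Dict.keys_foldl_insert_key sequence (fun p => p.1)
      (fun (d : PySem.Dict String (Int × Int)) (p : String × Int) =>
        (match d.get? p.1 with
          | some mm => (max mm.1 p.2, min mm.2 p.2)
          | none => (p.2, p.2))),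
      PySem.Dict.keys_empty, PySem.Set.update_nil_left]
  have hNodup : Agg.keys.Nodup := by rw [hKAgg]; exact PySem.Set.nodup_ofList _
  rw [PySem.List.foldl_append_singleton_eq_map
      (f := fun letter => (letter, (PySem.List.max? (G.getD letter []) (fun y => y)).getD 0,
        (PySem.List.min? (G.getD letter []) (fun y => y)).getD 0)),
    List.nil_append, pv_items_map Agg hNodup, hKG, hKAgg]
  apply List.map_congr_left
  intro k hk
  have hmem : k ∈ sequence.map (fun p => p.1) := (PySem.Set.mem_ofList _ _).mp hk
  have hGk : G.getD k [] = (sequence.filter (fun p => p.1 == k)).map (fun p => p.2) := by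
    rw [hGdef, PySem.Dict.getD_foldl_modify_append, PySem.Dict.getD_empty, List.nil_append]
  have hAggk : Agg.get? k
      = ((sequence.filter (fun p => p.1 == k)).map (fun p => p.2)).foldl pvCombine none := by
    rw [hAggdef, pv_foldB_get?, PySem.Dict.get?_empty]
  obtain ⟨p, hp, hpk⟩ := List.mem_map.mp hmem
  have hne : (sequence.filter (fun p => p.1 == k)).map (fun p => p.2) ≠ [] := by
    simp only [ne_eq, List.map_eq_nil_iff, List.filter_eq_nil_iff]
    push_neg
    exact ⟨p, hp, by simp [hpk]⟩
  cases hnl : (sequence.filter (fun p => p.1 == k)).map (fun p => p.2) with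
  | nil => exact absurd hnl hne
  | cons x t =>
    rw [hnl] at hGk hAggk
    rw [List.foldl_cons] at hAggk
    have hx : pvCombine none x = some (x, x) := rfl
    rw [hx, pv_foldCombine_some] at hAggk
    rw [hGk, hAggk, PySem.List.max?_id_cons, PySem.List.min?_id_cons]
    rfl

-- ===== VERDICT (by name: the statement is the Claim_ definition above) =====
theorem obtenerValorMayorYMenor_spec : Claim_equal_obtenerValorMayorYMenor := by
  intro sequence _
  unfold Spec_obtenerValorMayorYMenor
  exact pv_main sequence
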